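-- pv_equiv track=rewrite | github.com/hnrm110901-cell/tunxiang-os | services/tx-org/src/services/employee_points_service.py | _next_level_info
-- ===== SOURCE A (Python) =====
-- LEVEL_THRESHOLDS: list[tuple[int, str]] = [
--     (0, "见习"),
--     (500, "铜星"),
--     (1500, "银星"),
--     (3000, "金星"),
--     (5000, "钻石"),
--     (8000, "王者"),
-- ]
--
-- def _next_level_info(total_points: int) -> tuple[str, int]:
--     idx = 0
--     for i, (t, _) in enumerate(LEVEL_THRESHOLDS):
--         if total_points >= t:
--             idx = i
--     if idx + 1 >= len(LEVEL_THRESHOLDS):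
--         return "", 0
--     next_t, next_label = LEVEL_THRESHOLDS[idx + 1]
--     return next_label, next_t - total_points
-- ===== SOURCE B (Python) =====
-- LEVEL_THRESHOLDS: list[tuple[int, str]] = [
--     (0, "见习"),
--     (500, "铜星"),
--     (1500, "银星"),
--     (3000, "金星"),
--     (5000, "钻石"),
--     (8000, "王者"),
-- ]
--
-- def _next_level_info(total_points: int) -> tuple[str, int]:
--     # single forward scan: first strictly-exceeding threshold (skipping the base level)
--     for t, label in LEVEL_THRESHOLDS[1:]:
--         if t > total_points:
--             return label, t - total_points
--     return "", 0
-- ===== Notes on version B (the rewrite author's own statement) =====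
-- stated objective: simpler
-- what changed: Replaced A's scan-for-last-satisfied-index plus offset-arithmetic with a single forward scan over the tail of the table that returns directly at the first threshold strictly above total_points.
import Mathlib
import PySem

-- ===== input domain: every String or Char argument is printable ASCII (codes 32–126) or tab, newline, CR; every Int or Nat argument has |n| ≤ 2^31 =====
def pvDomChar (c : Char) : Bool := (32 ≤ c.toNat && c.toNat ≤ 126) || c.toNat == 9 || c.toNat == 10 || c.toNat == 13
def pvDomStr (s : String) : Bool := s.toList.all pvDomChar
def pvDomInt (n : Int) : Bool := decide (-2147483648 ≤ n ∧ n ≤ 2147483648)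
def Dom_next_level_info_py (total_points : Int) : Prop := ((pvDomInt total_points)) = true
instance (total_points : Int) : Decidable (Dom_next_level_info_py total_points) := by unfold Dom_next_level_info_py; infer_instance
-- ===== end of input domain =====

-- B replaces A's last-satisfied-index scan + offset lookup with one forward scan of the tail returning at the first threshold strictly above total_points (objective: simpler).


-- ===== PORT A =====
def pvLevelThresholds : List (Int × String) :=
  [(0, "见习"), (500, "铜星"), (1500, "银星"), (3000, "金星"), (5000, "钻石"), (8000, "王者")]

-- for i, (t, _) in enumerate(...): if total_points >= t: idx = i
def next_level_info_py (total_points : Int) : String × Int :=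
  let idx : Int :=
    (PySem.List.enumerate pvLevelThresholds).foldl
      (fun idx it => if total_points ≥ it.2.1 then (it.1 : Int) else idx) 0
  if idx + 1 ≥ (pvLevelThresholds.length : Int) then ("", 0)
  else
    match PySem.List.pyGet? pvLevelThresholds (idx + 1) with
    | some (next_t, next_label) => (next_label, next_t - total_points)
    | none => ("", 0)  -- unreachable: idx+1 is in range here

-- ===== PORT B =====
-- B: first threshold in the tail strictly above total_points
def pvScanB (total_points : Int) : List (Int × String) → String × Int
  | [] => ("", 0)
  | (t, label) :: rest =>
      if t > total_points then (label, t - total_points) else pvScanB total_points rest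

def next_level_info_py_alt (total_points : Int) : String × Int :=
  pvScanB total_points (PySem.List.slice pvLevelThresholds (some 1) none)


-- ===== PRECONDITION & SPEC =====
def Spec_next_level_info_py (total_points : Int) (out : String × Int) : Prop := out = next_level_info_py_alt total_points
instance (total_points : Int) (out : String × Int) : Decidable (Spec_next_level_info_py total_points out) := by unfold Spec_next_level_info_py; infer_instance

-- ===== CLAIM (what is proved, stated in full; the proofs are below) =====
def Claim_equal_next_level_info_py : Prop := ∀ (total_points : Int), Dom_next_level_info_py total_points → Spec_next_level_info_py total_points (next_level_info_py total_points)

-- ===== LEMMAS AND PROOFS =====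

-- ===== VERDICT (by name: the statement is the Claim_ definition above) =====
theorem next_level_info_py_spec : Claim_equal_next_level_info_py := by
  intro t _
  unfold Spec_next_level_info_py next_level_info_py next_level_info_py_alt pvScanB pvLevelThresholds
  simp [PySem.List.enumerate, PySem.List.slice, PySem.List.pyGet?, PySem.List.pyIdx?]
  split_ifs <;> simp_all [pvScanB] <;> first | omega | (split_ifs <;> simp_all <;> omega)
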